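-- pv_equiv track=rewrite | github.com/QCJW/GTA-Text-Editing-Tool | SAGXT.py | gta_sa_hash
-- ===== SOURCE A (Python) =====
-- CRC32_TABLE = [
--     0x00000000, 0x77073096, 0xEE0E612C, 0x990951BA, 0x076DC419, 0x706AF48F, 0xE963A535, 0x9E6495A3,
--     0x0EDB8832, 0x79DCB8A4, 0xE0D5E91E, 0x97D2D988, 0x09B64C2B, 0x7EB17CBD, 0xE7B82D07, 0x90BF1D91,
--     0x1DB71064, 0x6AB020F2, 0xF3B97148, 0x84BE41DE, 0x1ADAD47D, 0x6DDDE4EB, 0xF4D4B551, 0x83D385C7,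
--     0x136C9856, 0x646BA8C0, 0xFD62F97A, 0x8A65C9EC, 0x14015C4F, 0x63066CD9, 0xFA0F3D63, 0x8D080DF5,
--     0x3B6E20C8, 0x4C69105E, 0xD56041E4, 0xA2677172, 0x3C03E4D1, 0x4B04D447, 0xD20D85FD, 0xA50AB56B,
--     0x35B5A8FA, 0x42B2986C, 0xDBBBC9D6, 0xACBCF940, 0x32D86CE3, 0x45DF5C75, 0xDCD60DCF, 0xABD13D59,
--     0x26D930AC, 0x51DE003A, 0xC8D75180, 0xBFD06116, 0x21B4F4B5, 0x56B3C423, 0xCFBA9599, 0xB8BDA50F,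
--     0x2802B89E, 0x5F058808, 0xC60CD9B2, 0xB10BE924, 0x2F6F7C87, 0x58684C11, 0xC1611DAB, 0xB6662D3D,
--     0x76DC4190, 0x01DB7106, 0x98D220BC, 0xEFD5102A, 0x71B18589, 0x06B6B51F, 0x9FBFE4A5, 0xE8B8D433,
--     0x7807C9A2, 0x0F00F934, 0x9609A88E, 0xE10E9818, 0x7F6A0DBB, 0x086D3D2D, 0x91646C97, 0xE6635C01,
--     0x6B6B51F4, 0x1C6C6162, 0x856530D8, 0xF262004E, 0x6C0695ED, 0x1B01A57B, 0x8208F4C1, 0xF50FC457,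
--     0x65B0D9C6, 0x12B7E950, 0x8BBEB8EA, 0xFCB9887C, 0x62DD1DDF, 0x15DA2D49, 0x8CD37CF3, 0xFBD44C65,
--     0x4DB26158, 0x3AB551CE, 0xA3BC0074, 0xD4BB30E2, 0x4ADFA541, 0x3DD895D7, 0xA4D1C46D, 0xD3D6F4FB,
--     0x4369E96A, 0x346ED9FC, 0xAD678846, 0xDA60B8D0, 0x44042D73, 0x33031DE5, 0xAA0A4C5F, 0xDD0D7CC9,
--     0x5005713C, 0x270241AA, 0xBE0B1010, 0xC90C2086, 0x5768B525, 0x206F85B3, 0xB966D409, 0xCE61E49F,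
--     0x5EDEF90E, 0x29D9C998, 0xB0D09822, 0xC7D7A8B4, 0x59B33D17, 0x2EB40D81, 0xB7BD5C3B, 0xC0BA6CAD,
--     0xEDB88320, 0x9ABFB3B6, 0x03B6E20C, 0x74B1D29A, 0xEAD54739, 0x9DD277AF, 0x04DB2615, 0x73DC1683,
--     0xE3630B12, 0x94643B84, 0x0D6D6A3E, 0x7A6A5AA8, 0xE40ECF0B, 0x9309FF9D, 0x0A00AE27, 0x7D079EB1,
--     0xF00F9344, 0x8708A3D2, 0x1E01F268, 0x6906C2FE, 0xF762575D, 0x806567CB, 0x196C3671, 0x6E6B06E7,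
--     0xFED41B76, 0x89D32BE0, 0x10DA7A5A, 0x67DD4ACC, 0xF9B9DF6F, 0x8EBEEFF9, 0x17B7BE43, 0x60B08ED5,
--     0xD6D6A3E8, 0xA1D1937E, 0x38D8C2C4, 0x4FDFF252, 0xD1BB67F1, 0xA6BC5767, 0x3FB506DD, 0x48B2364B,
--     0xD80D2BDA, 0xAF0A1B4C, 0x36034AF6, 0x41047A60, 0xDF60EFC3, 0xA867DF55, 0x316E8EEF, 0x4669BE79,
--     0xCB61B38C, 0xBC66831A, 0x256FD2A0, 0x5268E236, 0xCC0C7795, 0xBB0B4703, 0x220216B9, 0x5505262F,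
--     0xC5BA3BBE, 0xB2BD0B28, 0x2BB45A92, 0x5CB36A04, 0xC2D7FFA7, 0xB5D0CF31, 0x2CD99E8B, 0x5BDEAE1D,
--     0x9B64C2B0, 0xEC63F226, 0x756AA39C, 0x026D930A, 0x9C0906A9, 0xEB0E363F, 0x72076785, 0x05005713,
--     0x95BF4A82, 0xE2B87A14, 0x7BB12BAE, 0x0CB61B38, 0x92D28E9B, 0xE5D5BE0D, 0x7CDCEFB7, 0x0BDBDF21,
--     0x86D3D2D4, 0xF1D4E242, 0x68DDB3F8, 0x1FDA836E, 0x81BE16CD, 0xF6B9265B, 0x6FB077E1, 0x18B74777,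
--     0x88085AE6, 0xFF0F6A70, 0x66063BCA, 0x11010B5C, 0x8F659EFF, 0xF862AE69, 0x616BFFD3, 0x166CCF45,
--     0xA00AE278, 0xD70DD2EE, 0x4E048354, 0x3903B3C2, 0xA7672661, 0xD06016F7, 0x4969474D, 0x3E6E77DB,
--     0xAED16A4A, 0xD9D65ADC, 0x40DF0B66, 0x37D83BF0, 0xA9BCAE53, 0xDEBB9EC5, 0x47B2CF7F, 0x30B5FFE9,
--     0xBDBDF21C, 0xCABAC28A, 0x53B39330, 0x24B4A3A6, 0xBAD03605, 0xCDD70693, 0x54DE5729, 0x23D967BF,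
--     0xB3667A2E, 0xC4614AB8, 0x5D681B02, 0x2A6F2B94, 0xB40BBE37, 0xC30C8EA1, 0x5A05DF1B, 0x2D02EF8D
-- ]
--
-- def gta_sa_hash(key: str) -> int:
--     hash_val = 0xFFFFFFFF
--     for char in key:
--         # SA 哈希不区分大小写 (强制转为大写)
--         c_upper = char.upper()
--         c_byte = ord(c_upper) & 0xFF
--
--         idx = (hash_val ^ c_byte) & 0xFF
--         hash_val = CRC32_TABLE[idx] ^ (hash_val >> 8)
--
--     return hash_val # 与标准 CRC32 不同，末尾不进行位反转
-- ===== SOURCE B (Python) =====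
-- def gta_sa_hash(key: str) -> int:
--     hash_val = 0xFFFFFFFF
--     for char in key:
--         # same case-insensitive byte preparation, but compute the CRC step bit by bit
--         hash_val ^= ord(char.upper()) & 0xFF
--         for _ in range(8):
--             if hash_val & 1:
--                 hash_val = (hash_val >> 1) ^ 0xEDB88320
--             else:
--                 hash_val >>= 1
--     return hash_val
-- ===== Notes on version B (the rewrite author's own statement) =====
-- stated objective: simpler
-- what changed: Replaced the 256-entry CRC32 lookup table with an 8-iteration bitwise CRC step per character using the reflected polynomial 0xEDB88320, dropping the table entirely.
import Mathlib
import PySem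

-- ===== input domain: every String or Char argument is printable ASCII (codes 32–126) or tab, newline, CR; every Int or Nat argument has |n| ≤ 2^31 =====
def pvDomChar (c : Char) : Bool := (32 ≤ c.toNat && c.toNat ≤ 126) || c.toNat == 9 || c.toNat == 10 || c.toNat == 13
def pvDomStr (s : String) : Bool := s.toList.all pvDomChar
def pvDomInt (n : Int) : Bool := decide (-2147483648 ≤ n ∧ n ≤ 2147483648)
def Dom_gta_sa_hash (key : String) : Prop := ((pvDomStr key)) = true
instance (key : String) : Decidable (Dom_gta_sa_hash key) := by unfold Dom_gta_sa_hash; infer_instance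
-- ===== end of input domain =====

-- B replaces A's 256-entry CRC32 lookup table with an 8-iteration bitwise CRC step per character (simpler: no table).

-- ===== PORT A =====
def crcTable : List Int := [
  0x00000000, 0x77073096, 0xEE0E612C, 0x990951BA, 0x076DC419, 0x706AF48F, 0xE963A535, 0x9E6495A3,
  0x0EDB8832, 0x79DCB8A4, 0xE0D5E91E, 0x97D2D988, 0x09B64C2B, 0x7EB17CBD, 0xE7B82D07, 0x90BF1D91,
  0x1DB71064, 0x6AB020F2, 0xF3B97148, 0x84BE41DE, 0x1ADAD47D, 0x6DDDE4EB, 0xF4D4B551, 0x83D385C7,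
  0x136C9856, 0x646BA8C0, 0xFD62F97A, 0x8A65C9EC, 0x14015C4F, 0x63066CD9, 0xFA0F3D63, 0x8D080DF5,
  0x3B6E20C8, 0x4C69105E, 0xD56041E4, 0xA2677172, 0x3C03E4D1, 0x4B04D447, 0xD20D85FD, 0xA50AB56B,
  0x35B5A8FA, 0x42B2986C, 0xDBBBC9D6, 0xACBCF940, 0x32D86CE3, 0x45DF5C75, 0xDCD60DCF, 0xABD13D59,
  0x26D930AC, 0x51DE003A, 0xC8D75180, 0xBFD06116, 0x21B4F4B5, 0x56B3C423, 0xCFBA9599, 0xB8BDA50F,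
  0x2802B89E, 0x5F058808, 0xC60CD9B2, 0xB10BE924, 0x2F6F7C87, 0x58684C11, 0xC1611DAB, 0xB6662D3D,
  0x76DC4190, 0x01DB7106, 0x98D220BC, 0xEFD5102A, 0x71B18589, 0x06B6B51F, 0x9FBFE4A5, 0xE8B8D433,
  0x7807C9A2, 0x0F00F934, 0x9609A88E, 0xE10E9818, 0x7F6A0DBB, 0x086D3D2D, 0x91646C97, 0xE6635C01,
  0x6B6B51F4, 0x1C6C6162, 0x856530D8, 0xF262004E, 0x6C0695ED, 0x1B01A57B, 0x8208F4C1, 0xF50FC457,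
  0x65B0D9C6, 0x12B7E950, 0x8BBEB8EA, 0xFCB9887C, 0x62DD1DDF, 0x15DA2D49, 0x8CD37CF3, 0xFBD44C65,
  0x4DB26158, 0x3AB551CE, 0xA3BC0074, 0xD4BB30E2, 0x4ADFA541, 0x3DD895D7, 0xA4D1C46D, 0xD3D6F4FB,
  0x4369E96A, 0x346ED9FC, 0xAD678846, 0xDA60B8D0, 0x44042D73, 0x33031DE5, 0xAA0A4C5F, 0xDD0D7CC9,
  0x5005713C, 0x270241AA, 0xBE0B1010, 0xC90C2086, 0x5768B525, 0x206F85B3, 0xB966D409, 0xCE61E49F,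
  0x5EDEF90E, 0x29D9C998, 0xB0D09822, 0xC7D7A8B4, 0x59B33D17, 0x2EB40D81, 0xB7BD5C3B, 0xC0BA6CAD,
  0xEDB88320, 0x9ABFB3B6, 0x03B6E20C, 0x74B1D29A, 0xEAD54739, 0x9DD277AF, 0x04DB2615, 0x73DC1683,
  0xE3630B12, 0x94643B84, 0x0D6D6A3E, 0x7A6A5AA8, 0xE40ECF0B, 0x9309FF9D, 0x0A00AE27, 0x7D079EB1,
  0xF00F9344, 0x8708A3D2, 0x1E01F268, 0x6906C2FE, 0xF762575D, 0x806567CB, 0x196C3671, 0x6E6B06E7,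
  0xFED41B76, 0x89D32BE0, 0x10DA7A5A, 0x67DD4ACC, 0xF9B9DF6F, 0x8EBEEFF9, 0x17B7BE43, 0x60B08ED5,
  0xD6D6A3E8, 0xA1D1937E, 0x38D8C2C4, 0x4FDFF252, 0xD1BB67F1, 0xA6BC5767, 0x3FB506DD, 0x48B2364B,
  0xD80D2BDA, 0xAF0A1B4C, 0x36034AF6, 0x41047A60, 0xDF60EFC3, 0xA867DF55, 0x316E8EEF, 0x4669BE79,
  0xCB61B38C, 0xBC66831A, 0x256FD2A0, 0x5268E236, 0xCC0C7795, 0xBB0B4703, 0x220216B9, 0x5505262F,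
  0xC5BA3BBE, 0xB2BD0B28, 0x2BB45A92, 0x5CB36A04, 0xC2D7FFA7, 0xB5D0CF31, 0x2CD99E8B, 0x5BDEAE1D,
  0x9B64C2B0, 0xEC63F226, 0x756AA39C, 0x026D930A, 0x9C0906A9, 0xEB0E363F, 0x72076785, 0x05005713,
  0x95BF4A82, 0xE2B87A14, 0x7BB12BAE, 0x0CB61B38, 0x92D28E9B, 0xE5D5BE0D, 0x7CDCEFB7, 0x0BDBDF21,
  0x86D3D2D4, 0xF1D4E242, 0x68DDB3F8, 0x1FDA836E, 0x81BE16CD, 0xF6B9265B, 0x6FB077E1, 0x18B74777,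
  0x88085AE6, 0xFF0F6A70, 0x66063BCA, 0x11010B5C, 0x8F659EFF, 0xF862AE69, 0x616BFFD3, 0x166CCF45,
  0xA00AE278, 0xD70DD2EE, 0x4E048354, 0x3903B3C2, 0xA7672661, 0xD06016F7, 0x4969474D, 0x3E6E77DB,
  0xAED16A4A, 0xD9D65ADC, 0x40DF0B66, 0x37D83BF0, 0xA9BCAE53, 0xDEBB9EC5, 0x47B2CF7F, 0x30B5FFE9,
  0xBDBDF21C, 0xCABAC28A, 0x53B39330, 0x24B4A3A6, 0xBAD03605, 0xCDD70693, 0x54DE5729, 0x23D967BF,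
  0xB3667A2E, 0xC4614AB8, 0x5D681B02, 0x2A6F2B94, 0xB40BBE37, 0xC30C8EA1, 0x5A05DF1B, 0x2D02EF8D]

-- CRC32_TABLE[idx]: idx is provably in [0, 255] (it is (… & 0xFF)) and the table has 256
-- entries, so Python never raises here; pyGetD's default 0 is never reached.
def gta_sa_hash (key : String) : Int :=
  key.toList.foldl (fun hash_val char =>
    let c_upper := PySem.Chars.upperChar char
    let c_byte := PySem.Int.band ((c_upper.toNat : Int)) 0xFF
    let idx := PySem.Int.band (PySem.Int.bxor hash_val c_byte) 0xFF
    PySem.Int.bxor (PySem.List.pyGetD crcTable idx 0) (hash_val >>> (8 : Nat)))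
    0xFFFFFFFF

-- ===== PORT B =====
def gta_sa_hash_alt (key : String) : Int :=
  key.toList.foldl (fun hash_val char =>
    let h1 := PySem.Int.bxor hash_val (PySem.Int.band (((PySem.Chars.upperChar char).toNat : Int)) 0xFF)
    (PySem.List.pyRange 0 8 1).foldl (fun h _ =>
      if PySem.Int.band h 1 ≠ 0 then PySem.Int.bxor (h >>> (1 : Nat)) 0xEDB88320
      else h >>> (1 : Nat)) h1)
    0xFFFFFFFF

-- ===== PRECONDITION & SPEC =====
def Spec_gta_sa_hash (key : String) (out : Int) : Prop := out = gta_sa_hash_alt key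
instance (key : String) (out : Int) : Decidable (Spec_gta_sa_hash key out) := by unfold Spec_gta_sa_hash; infer_instance

-- ===== CLAIM (what is proved, stated in full; the proofs are below) =====
def Claim_equal_gta_sa_hash : Prop := ∀ (key : String), Dom_gta_sa_hash key → Spec_gta_sa_hash key (gta_sa_hash key)

-- ===== LEMMAS AND PROOFS =====

-- Nat-level model of one bitwise CRC round
def natStep (h : Nat) : Nat := if h &&& 1 = 1 then (h >>> 1) ^^^ 0xEDB88320 else h >>> 1

lemma natStep_xor (a b : Nat) : natStep (a ^^^ b) = natStep a ^^^ natStep b := by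
  unfold natStep
  have ha : a &&& 1 = 0 ∨ a &&& 1 = 1 := by rw [Nat.and_one_is_mod]; omega
  have hb : b &&& 1 = 0 ∨ b &&& 1 = 1 := by rw [Nat.and_one_is_mod]; omega
  rw [Nat.and_xor_distrib_right, Nat.shiftRight_xor_distrib]
  rcases ha with h | h <;> rcases hb with h' | h' <;>
    simp [h, h', Nat.xor_assoc, Nat.xor_comm, Nat.xor_left_comm]

lemma natIter_xor (k a b : Nat) : natStep^[k] (a ^^^ b) = natStep^[k] a ^^^ natStep^[k] b := by
  induction k generalizing a b with
  | zero => rfl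
  | succ k ih => simp [Function.iterate_succ_apply, natStep_xor, ih]

lemma natIter_shift (k y : Nat) : natStep^[k] (y <<< k) = y := by
  induction k generalizing y with
  | zero => simp
  | succ k ih =>
    rw [Function.iterate_succ_apply]
    have h2 : y <<< (k + 1) = (y <<< k) * 2 := by
      rw [Nat.shiftLeft_succ]; ring
    have hcond : (y <<< (k + 1)) &&& 1 = 0 := by
      rw [h2, Nat.and_one_is_mod]; omega
    have hshift : (y <<< (k + 1)) >>> 1 = y <<< k := by
      rw [h2, Nat.shiftRight_one, Nat.mul_div_cancel _ (by norm_num)]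
    rw [show natStep (y <<< (k+1)) = y <<< k by unfold natStep; rw [hcond, hshift]; simp]
    exact ih y

lemma natDecomp (x : Nat) : x = (x &&& 255) ^^^ ((x >>> 8) <<< 8) := by
  apply Nat.eq_of_testBit_eq
  intro i
  simp only [Nat.testBit_xor, Nat.testBit_and, Nat.testBit_shiftLeft, Nat.testBit_shiftRight]
  by_cases h : i < 8
  · have h255 : (255 : Nat).testBit i = true := by
      have : (255 : Nat) = 2 ^ 8 - 1 := by norm_num
      rw [this, Nat.testBit_two_pow_sub_one]; simp [h]
    simp [h255, Nat.not_le.mpr h]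
  · have h255 : (255 : Nat).testBit i = false := by
      have : (255 : Nat) = 2 ^ 8 - 1 := by norm_num
      rw [this, Nat.testBit_two_pow_sub_one]; simp [h]
    have h8 : 8 ≤ i := Nat.not_lt.mp h
    simp [h255, h8, Nat.add_sub_cancel' h8]

lemma natHigh (x c : Nat) (hc : c < 256) : (x ^^^ c) >>> 8 = x >>> 8 := by
  rw [Nat.shiftRight_xor_distrib]
  have : c >>> 8 = 0 := by
    rw [Nat.shiftRight_eq_div_pow]
    exact Nat.div_eq_of_lt (by omega)
  simp [this]

-- the whole point: eight bitwise rounds = table step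
lemma crc8_split (x : Nat) : natStep^[8] x = natStep^[8] (x &&& 255) ^^^ (x >>> 8) := by
  conv_lhs => rw [natDecomp x]
  rw [natIter_xor, natIter_shift]

set_option maxRecDepth 20000 in
lemma tableSpec : ∀ a ∈ List.range 256, crcTable.getD a 0 = ((natStep^[8] a : Nat) : Int) := by
  decide

-- the per-character step of port B, on a Nat-cast state, is natStep^[8]
lemma stepB_cast (n : Nat) :
    (PySem.List.pyRange 0 8 1).foldl (fun h _ =>
      if PySem.Int.band h 1 ≠ 0 then PySem.Int.bxor (h >>> (1 : Nat)) 0xEDB88320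
      else h >>> (1 : Nat)) ((n : Nat) : Int) = ((natStep^[8] n : Nat) : Int) := by
  have hstep : ∀ m : Nat, (if PySem.Int.band ((m : Nat) : Int) 1 ≠ 0 then
      PySem.Int.bxor (((m : Nat) : Int) >>> (1 : Nat)) 0xEDB88320
      else ((m : Nat) : Int) >>> (1 : Nat)) = ((natStep m : Nat) : Int) := by
    intro m
    have h1 : (1 : Int) = ((1 : Nat) : Int) := rfl
    have hp : (0xEDB88320 : Int) = ((0xEDB88320 : Nat) : Int) := rfl
    have hsh : ((m : Nat) : Int) >>> (1 : Nat) = ((m >>> 1 : Nat) : Int) := rfl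
    rw [h1, PySem.Int.band_natCast, hsh, hp, PySem.Int.bxor_natCast]
    have hm : m &&& 1 = 0 ∨ m &&& 1 = 1 := by rw [Nat.and_one_is_mod]; omega
    unfold natStep
    rcases hm with h | h <;> simp [h]
  have hr : PySem.List.pyRange 0 8 1 = [0, 1, 2, 3, 4, 5, 6, 7] := by decide
  rw [hr]
  simp only [List.foldl, hstep]
  rfl

lemma stepA_cast (n : Nat) (c : Char) :
    PySem.Int.bxor (PySem.List.pyGetD crcTable
        (PySem.Int.band (PySem.Int.bxor ((n : Nat) : Int)
          (PySem.Int.band (((PySem.Chars.upperChar c).toNat : Int)) 0xFF)) 0xFF) 0)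
      (((n : Nat) : Int) >>> (8 : Nat))
    = ((natStep^[8] (n ^^^ ((PySem.Chars.upperChar c).toNat &&& 255)) : Nat) : Int) := by
  set cb : Nat := (PySem.Chars.upperChar c).toNat &&& 255 with hcb
  have hcblt : cb < 256 := by
    have := Nat.and_le_right (n := (PySem.Chars.upperChar c).toNat) (m := 255)
    omega
  have h255 : (0xFF : Int) = ((255 : Nat) : Int) := rfl
  have hsh : ((n : Nat) : Int) >>> (8 : Nat) = ((n >>> 8 : Nat) : Int) := rfl
  rw [h255, PySem.Int.band_natCast, PySem.Int.bxor_natCast, PySem.Int.band_natCast,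
      PySem.List.pyGetD_natCast, hsh]
  have hidx : (n ^^^ cb) &&& 255 < 256 := by
    have := Nat.and_le_right (n := n ^^^ cb) (m := 255)
    omega
  rw [tableSpec _ (List.mem_range.mpr hidx), PySem.Int.bxor_natCast]
  rw [← natHigh n cb hcblt, ← crc8_split]

lemma fold_eq (l : List Char) (n : Nat) :
    l.foldl (fun hash_val char =>
      let c_upper := PySem.Chars.upperChar char
      let c_byte := PySem.Int.band ((c_upper.toNat : Int)) 0xFF
      let idx := PySem.Int.band (PySem.Int.bxor hash_val c_byte) 0xFF
      PySem.Int.bxor (PySem.List.pyGetD crcTable idx 0) (hash_val >>> (8 : Nat))) ((n : Nat) : Int)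
    = l.foldl (fun hash_val char =>
      let h1 := PySem.Int.bxor hash_val (PySem.Int.band (((PySem.Chars.upperChar char).toNat : Int)) 0xFF)
      (PySem.List.pyRange 0 8 1).foldl (fun h _ =>
        if PySem.Int.band h 1 ≠ 0 then PySem.Int.bxor (h >>> (1 : Nat)) 0xEDB88320
        else h >>> (1 : Nat)) h1) ((n : Nat) : Int) := by
  induction l generalizing n with
  | nil => rfl
  | cons c l ih =>
    simp only [List.foldl_cons]
    have hb : PySem.Int.bxor ((n : Nat) : Int)
        (PySem.Int.band (((PySem.Chars.upperChar c).toNat : Int)) 0xFF)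
        = (((n ^^^ ((PySem.Chars.upperChar c).toNat &&& 255)) : Nat) : Int) := by
      have h255 : (0xFF : Int) = ((255 : Nat) : Int) := rfl
      rw [h255, PySem.Int.band_natCast, PySem.Int.bxor_natCast]
    rw [stepA_cast n c, hb, stepB_cast]
    exact ih _

-- ===== VERDICT (by name: the statement is the Claim_ definition above) =====
theorem gta_sa_hash_spec : Claim_equal_gta_sa_hash := by
  intro key _
  unfold Spec_gta_sa_hash gta_sa_hash gta_sa_hash_alt
  have h0 : (0xFFFFFFFF : Int) = ((0xFFFFFFFF : Nat) : Int) := rfl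
  rw [h0]
  exact fold_eq key.toList 0xFFFFFFFF
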